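-- pv_equiv track=rewrite | github.com/CodyLe0404/Generate_Yield_Report_Assy | ESI_SIP_DAILY_YIELD.py | all_data_build
-- ===== SOURCE A (Python) =====
-- def all_data_build(data, device_type):
--     if 'QM' not in device_type:
--         data_all = {
--         'FOL': {key: "" for key in ['SUB/L', 'SMT1', 'MOLD1', 'SMT2']},
--         'EOL': {key: "" for key in ['MOLD2', 'SMT3', 'LASER', 'PKG Saw', 'SPUTTER1', 'SPUTTER2', 'DMZ &FVI']},
--         'TEST': {key: "" for key in ['SLT0', 'SLT1', 'SLT2', 'SLT3', 'AVI/TNR']}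
--         }
--     else:
--         data_all = {
--         'FOL': {key: "" for key in ['2DSM', 'TOP SMT', 'TOP MOLD', 'BTM SMT']},
--         'EOL': {key: "" for key in ['BTM MOLD', 'LASER', 'SMT Reball', 'PKG Saw', 'SPUTTER1', 'DMZ &FVI']},
--         'TEST': {key: "" for key in ['SLT0', 'SLT1', 'SLT2', 'SLT3', 'AVI/TNR']}
--         }
--
--     for key in data:
--         if key in data_all['FOL']:
--             data_all['FOL'][key] = data[key]
--         elif key in data_all['EOL']:
--             data_all['EOL'][key] = data[key]
--         elif key in data_all['TEST']:
--             data_all['TEST'][key] = data[key]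
--
--     return data_all
-- ===== SOURCE B (Python) =====
-- def all_data_build(data, device_type):
--     if 'QM' not in device_type:
--         groups = {'FOL': ['SUB/L', 'SMT1', 'MOLD1', 'SMT2'],
--                   'EOL': ['MOLD2', 'SMT3', 'LASER', 'PKG Saw', 'SPUTTER1', 'SPUTTER2', 'DMZ &FVI'],
--                   'TEST': ['SLT0', 'SLT1', 'SLT2', 'SLT3', 'AVI/TNR']}
--     else:
--         groups = {'FOL': ['2DSM', 'TOP SMT', 'TOP MOLD', 'BTM SMT'],
--                   'EOL': ['BTM MOLD', 'LASER', 'SMT Reball', 'PKG Saw', 'SPUTTER1', 'DMZ &FVI'],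
--                   'TEST': ['SLT0', 'SLT1', 'SLT2', 'SLT3', 'AVI/TNR']}
--     return {cat: {stage: data.get(stage, "") for stage in stages}
--             for cat, stages in groups.items()}
-- ===== Notes on version B (the rewrite author's own statement) =====
-- stated objective: idiomatic
-- what changed: A walks the input dict's keys and routes each through an if/elif/elif membership chain into the pre-built template; B instead walks the fixed category/stage template and fills every slot directly with data.get(stage, ''), eliminating the classification chain and the input-driven loop.
import Mathlib
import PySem

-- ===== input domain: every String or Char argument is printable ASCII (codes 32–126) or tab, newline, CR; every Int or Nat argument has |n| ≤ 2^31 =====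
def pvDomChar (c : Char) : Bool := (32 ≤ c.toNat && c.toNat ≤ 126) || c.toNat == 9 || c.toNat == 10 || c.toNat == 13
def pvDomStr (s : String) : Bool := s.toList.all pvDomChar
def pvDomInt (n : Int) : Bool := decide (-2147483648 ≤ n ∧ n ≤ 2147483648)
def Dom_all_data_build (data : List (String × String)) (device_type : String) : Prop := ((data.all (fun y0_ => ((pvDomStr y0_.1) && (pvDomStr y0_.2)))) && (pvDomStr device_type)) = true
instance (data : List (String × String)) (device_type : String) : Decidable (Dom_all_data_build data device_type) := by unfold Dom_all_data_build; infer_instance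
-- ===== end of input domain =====

-- B replaces A's input-walking if/elif routing loop by a walk over the fixed
-- category/stage template filled with data.get(stage, "") (idiomatic; same cost).

-- the six fixed stage lists (shared data constants)
def pvFOL : List String := ["SUB/L", "SMT1", "MOLD1", "SMT2"]
def pvEOL : List String := ["MOLD2", "SMT3", "LASER", "PKG Saw", "SPUTTER1", "SPUTTER2", "DMZ &FVI"]
def pvTEST : List String := ["SLT0", "SLT1", "SLT2", "SLT3", "AVI/TNR"]
def pvFOLq : List String := ["2DSM", "TOP SMT", "TOP MOLD", "BTM SMT"]
def pvEOLq : List String := ["BTM MOLD", "LASER", "SMT Reball", "PKG Saw", "SPUTTER1", "DMZ &FVI"]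
def pvTESTq : List String := ["SLT0", "SLT1", "SLT2", "SLT3", "AVI/TNR"]

-- ===== PORT A =====
-- A's loop body ('for key in data: if key in data_all['FOL']: … elif … elif …').
-- data[key] is ported as d.getD key "" : exact here because key ranges over d.keys.
def pvStepA (d : PySem.Dict String String) (da : PySem.Dict String (PySem.Dict String String)) (key : String) : PySem.Dict String (PySem.Dict String String) :=
  if ((da.get? "FOL").getD PySem.Dict.empty).contains key then
    da.modify "FOL" PySem.Dict.empty (fun inner => inner.insert key (d.getD key ""))
  else if ((da.get? "EOL").getD PySem.Dict.empty).contains key then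
    da.modify "EOL" PySem.Dict.empty (fun inner => inner.insert key (d.getD key ""))
  else if ((da.get? "TEST").getD PySem.Dict.empty).contains key then
    da.modify "TEST" PySem.Dict.empty (fun inner => inner.insert key (d.getD key ""))
  else da

def all_data_build (data : List (String × String)) (device_type : String) : List (String × List (String × String)) :=
  let data_all : PySem.Dict String (PySem.Dict String String) :=
    if PySem.Str.isIn "QM" device_type = false then
      PySem.Dict.ofList [("FOL", PySem.Dict.ofList (pvFOL.map (fun k => (k, "")))),
                         ("EOL", PySem.Dict.ofList (pvEOL.map (fun k => (k, "")))),
                         ("TEST", PySem.Dict.ofList (pvTEST.map (fun k => (k, ""))))]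
    else
      PySem.Dict.ofList [("FOL", PySem.Dict.ofList (pvFOLq.map (fun k => (k, "")))),
                         ("EOL", PySem.Dict.ofList (pvEOLq.map (fun k => (k, "")))),
                         ("TEST", PySem.Dict.ofList (pvTESTq.map (fun k => (k, ""))))]
  let d := PySem.Dict.ofList data
  let res := d.keys.foldl (pvStepA d) data_all
  res.items.map (fun p => (p.1, p.2.items))

-- ===== PORT B =====
def all_data_build_alt (data : List (String × String)) (device_type : String) : List (String × List (String × String)) :=
  let d := PySem.Dict.ofList data
  let groups : List (String × List String) :=
    if PySem.Str.isIn "QM" device_type = false then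
      [("FOL", pvFOL), ("EOL", pvEOL), ("TEST", pvTEST)]
    else
      [("FOL", pvFOLq), ("EOL", pvEOLq), ("TEST", pvTESTq)]
  groups.map (fun cs => (cs.1, cs.2.map (fun stage => (stage, d.getD stage ""))))

-- ===== PRECONDITION & SPEC =====
def Spec_all_data_build (data : List (String × String)) (device_type : String) (out : List (String × List (String × String))) : Prop := out = all_data_build_alt data device_type
instance (data : List (String × String)) (device_type : String) (out : List (String × List (String × String))) : Decidable (Spec_all_data_build data device_type out) := by unfold Spec_all_data_build; infer_instance

-- ===== CLAIM (what is proved, stated in full; the proofs are below) =====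
def Claim_equal_all_data_build : Prop := ∀ (data : List (String × String)) (device_type : String), Dom_all_data_build data device_type → Spec_all_data_build data device_type (all_data_build data device_type)

-- ===== LEMMAS AND PROOFS =====

-- a template sub-dict over stage list L with valuation v
def mkT (L : List String) (v : String → String) : PySem.Dict String String :=
  PySem.Dict.mk (L.map (fun k => (k, v k)))

def mkTriple (f e t : PySem.Dict String String) : PySem.Dict String (PySem.Dict String String) :=
  PySem.Dict.mk [("FOL", f), ("EOL", e), ("TEST", t)]

theorem mkT_ext (L : List String) (v w : String → String) (h : ∀ j ∈ L, v j = w j) :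
    mkT L v = mkT L w := by
  unfold mkT
  exact congrArg PySem.Dict.mk (List.map_congr_left (fun j hj => by rw [h j hj]))

theorem triple_eq (f f' e e' t t' : PySem.Dict String String)
    (hf : f = f') (he : e = e') (ht : t = t') : mkTriple f e t = mkTriple f' e' t' := by
  rw [hf, he, ht]

theorem contains_mkT (L : List String) (v : String → String) (k : String) :
    (mkT L v).contains k = decide (k ∈ L) := by
  rw [PySem.Dict.contains_eq_decide_mem_keys]
  have : (mkT L v).keys = L := by
    simp [mkT, PySem.Dict.keys, Function.comp_def]
  rw [this]

theorem insert_mkT (L : List String) (v : String → String) (k w : String) (hk : k ∈ L) :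
    (mkT L v).insert k w = mkT L (fun j => if j = k then w else v j) := by
  apply PySem.Dict.ext
  have hc : (mkT L v).contains k = true := by simp [contains_mkT, hk]
  rw [PySem.Dict.items_insert, if_pos hc]
  simp only [mkT, List.map_map]
  apply List.map_congr_left
  intro j _
  by_cases h : j = k <;> simp [h]

theorem get?_triple_FOL (f e t : PySem.Dict String String) :
    (mkTriple f e t).get? "FOL" = some f := by
  simp [mkTriple, PySem.Dict.get?_mk_cons]

theorem get?_triple_EOL (f e t : PySem.Dict String String) :
    (mkTriple f e t).get? "EOL" = some e := by
  simp [mkTriple, PySem.Dict.get?_mk_cons]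

theorem get?_triple_TEST (f e t : PySem.Dict String String) :
    (mkTriple f e t).get? "TEST" = some t := by
  simp [mkTriple, PySem.Dict.get?_mk_cons]

theorem modify_triple_FOL (f e t : PySem.Dict String String) (g : PySem.Dict String String → PySem.Dict String String) :
    (mkTriple f e t).modify "FOL" PySem.Dict.empty g = mkTriple (g f) e t := by
  rfl

theorem modify_triple_EOL (f e t : PySem.Dict String String) (g : PySem.Dict String String → PySem.Dict String String) :
    (mkTriple f e t).modify "EOL" PySem.Dict.empty g = mkTriple f (g e) t := by
  rfl

theorem modify_triple_TEST (f e t : PySem.Dict String String) (g : PySem.Dict String String → PySem.Dict String String) :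
    (mkTriple f e t).modify "TEST" PySem.Dict.empty g = mkTriple f e (g t) := by
  rfl

theorem fold_triple (d : PySem.Dict String String) (LF LE LT : List String)
    (ks : List String) (vf ve vt : String → String) :
    ks.foldl (pvStepA d) (mkTriple (mkT LF vf) (mkT LE ve) (mkT LT vt))
      = mkTriple (mkT LF (fun j => if j ∈ ks then d.getD j "" else vf j))
                 (mkT LE (fun j => if j ∈ ks ∧ j ∉ LF then d.getD j "" else ve j))
                 (mkT LT (fun j => if j ∈ ks ∧ j ∉ LF ∧ j ∉ LE then d.getD j "" else vt j)) := by
  induction ks generalizing vf ve vt with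
  | nil =>
    simp only [List.foldl_nil]
    apply triple_eq <;> apply mkT_ext <;> intro j hj <;> simp
  | cons k ks ih =>
    rw [List.foldl_cons]
    by_cases hF : k ∈ LF
    · have hstep : pvStepA d (mkTriple (mkT LF vf) (mkT LE ve) (mkT LT vt)) k
          = mkTriple (mkT LF (fun j => if j = k then d.getD k "" else vf j)) (mkT LE ve) (mkT LT vt) := by
        unfold pvStepA
        rw [get?_triple_FOL]
        simp only [Option.getD_some, contains_mkT]
        rw [if_pos (by simp [hF])]
        rw [modify_triple_FOL, insert_mkT _ _ _ _ hF]
      rw [hstep, ih]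
      apply triple_eq <;> apply mkT_ext <;> intro j hj
      · by_cases hjs : j ∈ ks <;> by_cases hjk : j = k <;>
          simp_all [List.mem_cons]
      · by_cases hjs : j ∈ ks <;> by_cases hjk : j = k <;> by_cases hjF : j ∈ LF <;>
          simp_all [List.mem_cons]
      · by_cases hjs : j ∈ ks <;> by_cases hjk : j = k <;> by_cases hjF : j ∈ LF <;>
          simp_all [List.mem_cons]
    · by_cases hE : k ∈ LE
      · have hstep : pvStepA d (mkTriple (mkT LF vf) (mkT LE ve) (mkT LT vt)) k
            = mkTriple (mkT LF vf) (mkT LE (fun j => if j = k then d.getD k "" else ve j)) (mkT LT vt) := by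
          unfold pvStepA
          rw [get?_triple_FOL, get?_triple_EOL]
          simp only [Option.getD_some, contains_mkT]
          rw [if_neg (by simp [hF]), if_pos (by simp [hE])]
          rw [modify_triple_EOL, insert_mkT _ _ _ _ hE]
        rw [hstep, ih]
        apply triple_eq <;> apply mkT_ext <;> intro j hj
        · by_cases hjs : j ∈ ks <;> by_cases hjk : j = k <;>
            simp_all [List.mem_cons]
        · by_cases hjs : j ∈ ks <;> by_cases hjk : j = k <;> by_cases hjF : j ∈ LF <;>
            simp_all [List.mem_cons]
        · by_cases hjs : j ∈ ks <;> by_cases hjk : j = k <;> by_cases hjF : j ∈ LF <;>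
            by_cases hjE : j ∈ LE <;> simp_all [List.mem_cons]
      · by_cases hT : k ∈ LT
        · have hstep : pvStepA d (mkTriple (mkT LF vf) (mkT LE ve) (mkT LT vt)) k
              = mkTriple (mkT LF vf) (mkT LE ve) (mkT LT (fun j => if j = k then d.getD k "" else vt j)) := by
            unfold pvStepA
            rw [get?_triple_FOL, get?_triple_EOL, get?_triple_TEST]
            simp only [Option.getD_some, contains_mkT]
            rw [if_neg (by simp [hF]), if_neg (by simp [hE]), if_pos (by simp [hT])]
            rw [modify_triple_TEST, insert_mkT _ _ _ _ hT]
          rw [hstep, ih]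
          apply triple_eq <;> apply mkT_ext <;> intro j hj
          · by_cases hjs : j ∈ ks <;> by_cases hjk : j = k <;>
              simp_all [List.mem_cons]
          · by_cases hjs : j ∈ ks <;> by_cases hjk : j = k <;> by_cases hjF : j ∈ LF <;>
              simp_all [List.mem_cons]
          · by_cases hjs : j ∈ ks <;> by_cases hjk : j = k <;> by_cases hjF : j ∈ LF <;>
              by_cases hjE : j ∈ LE <;> simp_all [List.mem_cons]
        · have hstep : pvStepA d (mkTriple (mkT LF vf) (mkT LE ve) (mkT LT vt)) k
              = mkTriple (mkT LF vf) (mkT LE ve) (mkT LT vt) := by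
            unfold pvStepA
            rw [get?_triple_FOL, get?_triple_EOL, get?_triple_TEST]
            simp only [Option.getD_some, contains_mkT]
            rw [if_neg (by simp [hF]), if_neg (by simp [hE]), if_neg (by simp [hT])]
          rw [hstep, ih]
          apply triple_eq <;> apply mkT_ext <;> intro j hj
          · by_cases hjs : j ∈ ks <;> by_cases hjk : j = k <;>
              simp_all [List.mem_cons]
          · by_cases hjs : j ∈ ks <;> by_cases hjk : j = k <;> by_cases hjF : j ∈ LF <;>
              simp_all [List.mem_cons]
          · by_cases hjs : j ∈ ks <;> by_cases hjk : j = k <;> by_cases hjF : j ∈ LF <;>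
              by_cases hjE : j ∈ LE <;> simp_all [List.mem_cons]

theorem getD_of_not_mem_keys (d : PySem.Dict String String) (j : String) (h : j ∉ d.keys) :
    d.getD j "" = "" := by
  apply PySem.Dict.getD_of_not_contains
  rw [PySem.Dict.contains_eq_decide_mem_keys]
  simp [h]

theorem items_mkT (L : List String) (v : String → String) :
    (mkT L v).items = L.map (fun j => (j, v j)) := rfl

theorem fill_eq (d : PySem.Dict String String) (L : List String) (cond : String → Prop)
    [DecidablePred cond] (hcond : ∀ j ∈ L, (j ∈ d.keys → cond j)) :
    L.map (fun j => (j, if cond j then d.getD j "" else "")) = L.map (fun s => (s, d.getD s "")) := by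
  apply List.map_congr_left
  intro j hj
  by_cases hk : j ∈ d.keys
  · rw [if_pos (hcond j hj hk)]
  · rw [getD_of_not_mem_keys d j hk]
    split_ifs <;> rfl

theorem main_lemma (d : PySem.Dict String String) (LF LE LT : List String)
    (hEF : ∀ j ∈ LE, j ∉ LF) (hTF : ∀ j ∈ LT, j ∉ LF) (hTE : ∀ j ∈ LT, j ∉ LE) :
    (d.keys.foldl (pvStepA d)
        (mkTriple (mkT LF (fun _ => "")) (mkT LE (fun _ => "")) (mkT LT (fun _ => "")))).items.map
        (fun p => (p.1, p.2.items))
      = [("FOL", LF.map (fun s => (s, d.getD s ""))),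
         ("EOL", LE.map (fun s => (s, d.getD s ""))),
         ("TEST", LT.map (fun s => (s, d.getD s "")))] := by
  rw [fold_triple]
  show [("FOL", (mkT LF _).items), ("EOL", (mkT LE _).items), ("TEST", (mkT LT _).items)] = _
  rw [items_mkT, items_mkT, items_mkT]
  rw [fill_eq d LF (fun j => j ∈ d.keys) (by intro j _ h; exact h)]
  rw [fill_eq d LE (fun j => j ∈ d.keys ∧ j ∉ LF) (by intro j hj h; exact ⟨h, hEF j hj⟩)]
  rw [fill_eq d LT (fun j => j ∈ d.keys ∧ j ∉ LF ∧ j ∉ LE)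
        (by intro j hj h; exact ⟨h, hTF j hj, hTE j hj⟩)]

theorem tmpl_nonQM :
    PySem.Dict.ofList [("FOL", PySem.Dict.ofList (pvFOL.map (fun k => (k, "")))),
                       ("EOL", PySem.Dict.ofList (pvEOL.map (fun k => (k, "")))),
                       ("TEST", PySem.Dict.ofList (pvTEST.map (fun k => (k, ""))))]
      = mkTriple (mkT pvFOL (fun _ => "")) (mkT pvEOL (fun _ => "")) (mkT pvTEST (fun _ => "")) := by
  decide

theorem tmpl_QM :
    PySem.Dict.ofList [("FOL", PySem.Dict.ofList (pvFOLq.map (fun k => (k, "")))),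
                       ("EOL", PySem.Dict.ofList (pvEOLq.map (fun k => (k, "")))),
                       ("TEST", PySem.Dict.ofList (pvTESTq.map (fun k => (k, ""))))]
      = mkTriple (mkT pvFOLq (fun _ => "")) (mkT pvEOLq (fun _ => "")) (mkT pvTESTq (fun _ => "")) := by
  decide

-- ===== VERDICT (by name: the statement is the Claim_ definition above) =====
theorem all_data_build_spec : Claim_equal_all_data_build := by
  intro data device_type _
  unfold Spec_all_data_build
  show all_data_build data device_type = all_data_build_alt data device_type
  simp only [all_data_build, all_data_build_alt]
  by_cases h : PySem.Str.isIn "QM" device_type = false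
  · rw [if_pos h, if_pos h, tmpl_nonQM,
      main_lemma _ _ _ _ (by decide) (by decide) (by decide)]
    rfl
  · rw [if_neg h, if_neg h, tmpl_QM,
      main_lemma _ _ _ _ (by decide) (by decide) (by decide)]
    rfl
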